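-- pv_equiv track=rewrite | github.com/franticalien/SIKE-Fault-Attack | fault_sim.py | num_block_gen
-- ===== SOURCE A (Python) =====
-- def num_block_gen(a,m):
--     r=2**15;
--     a_block = []
--     for i in range(m):
--         a_block.append(0)
--     i=0
--     while(a>0):
--         t1=a%r
--         a_block[i]=t1
--         i=i+1
--         a=a//r
--     return a_block
-- ===== SOURCE B (Python) =====
-- def num_block_gen(a, m):
--     block = [0] * m
--     nbits = a.bit_length() if a > 0 else 0
--     for i in range((nbits + 14) // 15):
--         block[i] = (a >> (15 * i)) & 0x7FFF
--     return block
-- ===== Notes on version B (the rewrite author's own statement) =====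
-- stated objective: alternative
-- what changed: A extracts digits sequentially (while a>0: take a%2^15, then a//=2^15) and places each into the next slot of a preallocated list; B never updates a: it computes the digit count from a.bit_length() and fills block[i] with the independently computed (a >> 15*i) & 0x7FFF in an indexed for-loop.
import Mathlib
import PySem

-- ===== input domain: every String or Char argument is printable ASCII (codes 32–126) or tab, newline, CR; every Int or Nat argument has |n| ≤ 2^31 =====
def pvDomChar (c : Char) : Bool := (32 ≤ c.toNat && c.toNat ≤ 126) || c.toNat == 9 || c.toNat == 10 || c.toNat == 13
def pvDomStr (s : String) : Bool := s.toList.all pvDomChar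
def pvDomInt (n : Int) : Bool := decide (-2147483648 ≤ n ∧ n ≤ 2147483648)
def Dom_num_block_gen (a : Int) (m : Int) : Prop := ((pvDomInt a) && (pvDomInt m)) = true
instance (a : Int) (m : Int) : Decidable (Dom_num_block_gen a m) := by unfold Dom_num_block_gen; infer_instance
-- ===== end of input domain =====

-- B replaces A's sequential divide-and-place while-loop by random-access digit extraction:
-- the digit count is computed from bit_length and each block i is (a >> 15*i) & 0x7FFF,
-- computed independently in an indexed for-loop (objective: alternative).

-- termination measure for A's division loop, cited by the port's decreasing_by
theorem pvNBG_fdiv_lt (a : Int) (h : 0 < a) : (PySem.Int.floordiv a 32768).toNat < a.toNat := by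
  rw [PySem.Int.floordiv_eq_ediv_of_pos (by norm_num)]
  have h1 := Int.mul_ediv_add_emod a 32768
  have h2 := Int.emod_nonneg a (by norm_num : (32768:Int) ≠ 0)
  have h3 := Int.emod_lt_of_pos a (show (0:Int) < 32768 by norm_num)
  omega

-- ===== PORT A =====
-- 'for i in range(m): a_block.append(0)'
def pvNBGzeros (m : Int) : List Int :=
  (PySem.List.pyRange 0 m 1).foldl (fun l _ => l ++ [(0 : Int)]) []

-- 'while a > 0: t1 = a % r; a_block[i] = t1; i += 1; a = a // r'
-- (the index i is always ≥ 0 and, on inputs where Python A returns, in range, so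
-- a_block[i] = t1 is exactly List.set i; out of range Python raises — excluded by Pre_)
def pvNBGplace (a : Int) (i : Nat) (blk : List Int) : List Int :=
  if 0 < a then
    pvNBGplace (PySem.Int.floordiv a 32768) (i + 1) (blk.set i (PySem.Int.mod a 32768))
  else blk
termination_by a.toNat
decreasing_by exact pvNBG_fdiv_lt a (by assumption)

def num_block_gen (a : Int) (m : Int) : List Int :=
  pvNBGplace a 0 (pvNBGzeros m)

-- ===== PORT B =====
-- 'block = [0]*m; nbits = a.bit_length() if a > 0 else 0;
--  for i in range((nbits+14)//15): block[i] = (a >> (15*i)) & 0x7FFF'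
-- (Python's  a >> k  is Lean's  a >>> k  with k : Nat — pvShr fixes that instance — and
-- & is PySem.Int.band, both Python-exact; the loop index i is ≥ 0 and, where Python B
-- returns, in range, so block[i] = … is List.set)
def pvShr (x : Int) (k : Nat) : Int := x >>> k

def num_block_gen_alt (a : Int) (m : Int) : List Int :=
  let nbits : Int := if 0 < a then (PySem.Int.bitLength a : Int) else 0
  (PySem.List.pyRange 0 (PySem.Int.floordiv (nbits + 14) 15) 1).foldl
    (fun blk i => blk.set i.toNat (PySem.Int.band (pvShr a (15 * i).toNat) 32767))
    (List.replicate m.toNat 0)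

-- ===== PRECONDITION & SPEC =====
-- Pre_ excludes exactly the inputs on which Python A raises IndexError: a > 0 whose number
-- of base-2^15 digits, ⌈bit_length(a)/15⌉, exceeds the m slots (equivalently bit_length(a) > 15*m).
def Pre_num_block_gen (a : Int) (m : Int) : Prop :=
  a ≤ 0 ∨ (PySem.Int.bitLength a : Int) ≤ 15 * m
instance (a : Int) (m : Int) : Decidable (Pre_num_block_gen a m) := by
  unfold Pre_num_block_gen; infer_instance

def pvWitness_num_block_gen : Int × Int := (70000, 3)

def Spec_num_block_gen (a : Int) (m : Int) (out : List Int) : Prop := out = num_block_gen_alt a m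
instance (a : Int) (m : Int) (out : List Int) : Decidable (Spec_num_block_gen a m out) := by
  unfold Spec_num_block_gen; infer_instance

-- ===== CLAIM (what is proved, stated in full; the proofs are below) =====
def Claim_equal_num_block_gen : Prop := ∀ (a : Int) (m : Int), Dom_num_block_gen a m → Pre_num_block_gen a m → Spec_num_block_gen a m (num_block_gen a m)

-- ===== LEMMAS AND PROOFS =====

theorem pvNBG_append_zeros (xs : List Int) : ∀ l : List Int,
    xs.foldl (fun l _ => l ++ [(0 : Int)]) l = l ++ List.replicate xs.length 0 := by
  induction xs with
  | nil => simp
  | cons x xs ih =>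
    intro l
    simp only [List.foldl_cons, List.length_cons, List.replicate_succ, ih]
    simp

theorem pvNBG_zeros_eq (m : Int) : pvNBGzeros m = List.replicate m.toNat 0 := by
  unfold pvNBGzeros
  rw [pvNBG_append_zeros]
  simp [PySem.List.length_pyRange_one]

-- x & 0x7FFF = x % 2^15 for 0 ≤ x
theorem pvNBG_band_eq_mod (x : Int) (hx : 0 ≤ x) :
    PySem.Int.band x 32767 = x % 32768 := by
  rw [PySem.Int.band_of_nonneg hx (by norm_num)]
  have h := Nat.and_two_pow_sub_one_eq_mod x.toNat 15
  norm_num at h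
  rw [show ((32767 : Int).toNat) = 32767 from rfl, h]
  omega

theorem pvNBG_shr_eq_div (x : Int) (k : Nat) : pvShr x k = x / ((2 ^ k : Nat) : Int) :=
  Int.shiftRight_eq_div_pow x k

theorem pvNBG_place_stop (a : Int) (h : ¬ 0 < a) (i : Nat) (blk : List Int) :
    pvNBGplace a i blk = blk := by
  rw [pvNBGplace]; simp [h]

theorem pvNBG_place_step (a : Int) (h : 0 < a) (i : Nat) (blk : List Int) :
    pvNBGplace a i blk =
      pvNBGplace (PySem.Int.floordiv a 32768) (i + 1) (blk.set i (PySem.Int.mod a 32768)) := by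
  rw [pvNBGplace]; simp [h]

theorem num_block_gen_spec_aux : ∀ (a m : Int), Dom_num_block_gen a m →
    Pre_num_block_gen a m → num_block_gen a m = num_block_gen_alt a m := by
  intro a m hDom _
  unfold num_block_gen num_block_gen_alt
  rw [pvNBG_zeros_eq]
  by_cases h0 : 0 < a
  · -- bounds from Dom: 0 < a ≤ 2^31
    have hDom' : a ≤ 2147483648 := by
      unfold Dom_num_block_gen pvDomInt at hDom
      simp only [Bool.and_eq_true, decide_eq_true_eq] at hDom
      exact hDom.1.2
    simp only [h0, if_pos]
    -- bit-length bounds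
    have hbu := PySem.Int.lt_two_pow_bitLength a
    have hbl := PySem.Int.two_pow_bitLength_le a (by omega)
    have hNA : a.natAbs = a.toNat := by omega
    rw [hNA] at hbu hbl
    set bl := PySem.Int.bitLength a with hbldef
    have hbl1 : 1 ≤ bl := by
      rcases Nat.eq_zero_or_pos bl with hz | hp
      · rw [hz] at hbu; simp at hbu; omega
      · exact hp
    have hbl32 : bl ≤ 32 := by
      by_contra hc
      push Not at hc
      have : (2 : Nat) ^ 32 ≤ 2 ^ (bl - 1) := Nat.pow_le_pow_right (by norm_num) (by omega)
      omega
    -- common rewrites for the three digit values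
    have hfd : ∀ x : Int, PySem.Int.floordiv x 32768 = x / 32768 := fun x =>
      PySem.Int.floordiv_eq_ediv_of_pos (by norm_num)
    have hmd : ∀ x : Int, PySem.Int.mod x 32768 = x % 32768 := fun x =>
      PySem.Int.mod_eq_emod_of_pos (by norm_num)
    have hK : ∀ k : Int, 15 * (k - 1) < (bl : Int) → (bl : Int) ≤ 15 * k →
        PySem.Int.floordiv ((bl : Int) + 14) 15 = k := by
      intro k hk1 hk2
      rw [PySem.Int.floordiv_eq_ediv_of_pos (by norm_num)]
      omega
    have ha1 : a / 32768 / 32768 = a / 1073741824 := by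
      rw [Int.ediv_ediv_of_nonneg (by norm_num)]; norm_num
    by_cases hc1 : bl ≤ 15
    · -- one digit: a < 2^15
      have hlt : a < 32768 := by
        have : (2:Nat) ^ bl ≤ 2 ^ 15 := Nat.pow_le_pow_right (by norm_num) hc1
        omega
      rw [hK 1 (by omega) (by exact_mod_cast by omega)]
      rw [show PySem.List.pyRange 0 1 1 = [(0:Int)] from by decide]
      rw [pvNBG_place_step a h0, pvNBG_place_stop _ (by rw [hfd]; omega)]
      simp only [List.foldl_cons, List.foldl_nil, pvNBG_shr_eq_div]
      norm_num [show Int.toNat 0 = 0 from rfl,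
        pvNBG_band_eq_mod a (by omega), hmd]
    · by_cases hc2 : bl ≤ 30
      · -- two digits: 2^15 ≤ a < 2^30
        have hge : 32768 ≤ a := by
          have : (2:Nat) ^ 15 ≤ 2 ^ (bl - 1) := Nat.pow_le_pow_right (by norm_num) (by omega)
          omega
        have hlt : a < 1073741824 := by
          have : (2:Nat) ^ bl ≤ 2 ^ 30 := Nat.pow_le_pow_right (by norm_num) hc2
          omega
        have ha1pos : 0 < a / 32768 := by omega
        rw [hK 2 (by omega) (by omega)]
        rw [show PySem.List.pyRange 0 2 1 = [(0:Int), 1] from by decide]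
        rw [pvNBG_place_step a h0, pvNBG_place_step _ (by rw [hfd]; omega),
            pvNBG_place_stop _ (by rw [hfd, hfd, ha1]; omega)]
        simp only [List.foldl_cons, List.foldl_nil, pvNBG_shr_eq_div]
        norm_num [show Int.toNat 0 = 0 from rfl, show Int.toNat 15 = 15 from rfl,
          show Int.toNat 1 = 1 from rfl,
          pvNBG_band_eq_mod a (by omega),
          pvNBG_band_eq_mod (a / 32768) (by omega), hmd, hfd]
      · -- three digits: 2^30 ≤ a ≤ 2^31
        have hge : 1073741824 ≤ a := by
          have : (2:Nat) ^ 30 ≤ 2 ^ (bl - 1) := Nat.pow_le_pow_right (by norm_num) (by omega)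
          omega
        have ha2pos : 0 < a / 1073741824 := by omega
        have ha2 : a / 1073741824 / 32768 = 0 := by
          apply Int.ediv_eq_zero_of_lt (by omega)
          omega
        rw [hK 3 (by omega) (by omega)]
        rw [show PySem.List.pyRange 0 3 1 = [(0:Int), 1, 2] from by decide]
        rw [pvNBG_place_step a h0, pvNBG_place_step _ (by rw [hfd]; omega),
            pvNBG_place_step _ (by rw [hfd, hfd, ha1]; omega),
            pvNBG_place_stop _ (by rw [hfd, hfd, hfd, ha1, ha2]; omega)]
        simp only [List.foldl_cons, List.foldl_nil, pvNBG_shr_eq_div]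
        norm_num [show Int.toNat 0 = 0 from rfl, show Int.toNat 15 = 15 from rfl,
          show Int.toNat 30 = 30 from rfl, show Int.toNat 1 = 1 from rfl,
          show Int.toNat 2 = 2 from rfl,
          pvNBG_band_eq_mod a (by omega),
          pvNBG_band_eq_mod (a / 32768) (by omega),
          pvNBG_band_eq_mod (a / 1073741824) (by omega), hmd, hfd, ha1]
  · -- a ≤ 0: both return the zero block
    rw [pvNBG_place_stop a h0]
    simp only [h0, if_false]
    rw [show PySem.Int.floordiv ((0:Int) + 14) 15 = 0 from by decide]
    rw [show PySem.List.pyRange 0 0 1 = ([] : List Int) from by decide]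
    rfl

-- ===== VERDICT (by name: the statement is the Claim_ definition above) =====
theorem num_block_gen_spec : Claim_equal_num_block_gen := by
  intro a m hDom hPre
  unfold Spec_num_block_gen
  exact num_block_gen_spec_aux a m hDom hPre
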